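-- pv_equiv track=rewrite | github.com/elviorodriguez/MultimerMapper | utils/combinations.py | get_max_continuous_mer_size
-- ===== SOURCE A (Python) =====
-- def get_max_continuous_mer_size(pair_multivalency_states: dict) -> int:
--     """
--     Finds the maximum continuous mer size in the configurations.
--     Only considers consecutive mer sizes.
--     """
--     mer_sizes = sorted(set(len(config) for config in pair_multivalency_states.keys()))
--     max_continuous = min(mer_sizes)
--
--     for i, mer in enumerate(mer_sizes, start= max_continuous):
--         if i == mer:
--             max_continuous = i
--         else:
--             break
--
--     return max_continuous
-- ===== SOURCE B (Python) =====
-- def get_max_continuous_mer_size(pair_multivalency_states: dict) -> int: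
--     sizes = set(len(config) for config in pair_multivalency_states.keys())
--     m = min(sizes)
--     while m + 1 in sizes:
--         m += 1
--     return m
-- ===== Notes on version B (the rewrite author's own statement) =====
-- stated objective: simpler
-- what changed: Drops the sort and the enumerate counter entirely: B keeps the lengths as a set and probes consecutive integers upward from min(s) via set membership.
import Mathlib
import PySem

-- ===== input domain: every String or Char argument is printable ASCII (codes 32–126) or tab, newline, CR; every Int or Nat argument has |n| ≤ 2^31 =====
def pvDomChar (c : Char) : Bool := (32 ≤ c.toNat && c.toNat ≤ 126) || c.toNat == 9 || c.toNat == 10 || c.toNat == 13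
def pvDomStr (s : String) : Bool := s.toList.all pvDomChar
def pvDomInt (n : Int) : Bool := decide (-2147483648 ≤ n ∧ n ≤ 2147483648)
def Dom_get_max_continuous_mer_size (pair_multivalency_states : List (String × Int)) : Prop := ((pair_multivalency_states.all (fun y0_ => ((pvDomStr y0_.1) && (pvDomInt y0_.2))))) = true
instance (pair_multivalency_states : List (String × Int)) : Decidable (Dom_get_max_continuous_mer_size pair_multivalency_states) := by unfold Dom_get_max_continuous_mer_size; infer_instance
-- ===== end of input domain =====

-- B replaces A's sort + enumerate counter by probing consecutive integers upward from min(sizes)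
-- via set membership (objective: simpler). Return-value equivalence; neither version mutates its argument.

-- ===== PORT A =====
-- A's loop  'for i, mer in enumerate(mer_sizes, start=max_continuous): if i == mer: max_continuous = i else: break'
def pvALoop : List Int → Int → Int → Int
  | [], _, acc => acc
  | mer :: rest, i, acc => if i == mer then pvALoop rest (i + 1) i else acc

def get_max_continuous_mer_size (pair_multivalency_states : List (String × Int)) : Int :=
  let mer_sizes : List Int :=
    PySem.List.sorted (PySem.Set.ofList (pair_multivalency_states.map (fun config => PySem.Str.len config.1))) (fun x => x) false
  match PySem.List.min? mer_sizes (fun x => x) with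
  | none => 0   -- Python raises ValueError here (empty dict); excluded by Pre_
  | some m => pvALoop mer_sizes m m

-- ===== PORT B =====
-- B's loop  'while m + 1 in sizes: m += 1'  — fuel sizes.length bounds the iterations (the set is finite)
def pvBProbe : Nat → Int → PySem.Set Int → Int
  | 0, m, _ => m
  | fuel + 1, m, sizes => if PySem.Set.contains sizes (m + 1) then pvBProbe fuel (m + 1) sizes else m

def get_max_continuous_mer_size_alt (pair_multivalency_states : List (String × Int)) : Int :=
  let sizes : PySem.Set Int :=
    PySem.Set.ofList (pair_multivalency_states.map (fun config => PySem.Str.len config.1))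
  match PySem.List.min? sizes (fun x => x) with
  | none => 0   -- Python raises ValueError here (empty dict); excluded by Pre_
  | some m => pvBProbe sizes.length m sizes

-- ===== PRECONDITION & SPEC =====
-- Pre_ excludes only the empty dict, on which both A and B raise ValueError (min() of an empty sequence).
def Pre_get_max_continuous_mer_size (pair_multivalency_states : List (String × Int)) : Prop :=
  pair_multivalency_states ≠ []
instance (pair_multivalency_states : List (String × Int)) : Decidable (Pre_get_max_continuous_mer_size pair_multivalency_states) := by unfold Pre_get_max_continuous_mer_size; infer_instance

def pvWitness_get_max_continuous_mer_size : (List (String × Int)) := [("a", 1), ("bb", 2), ("ccc", 3)]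

def Spec_get_max_continuous_mer_size (pair_multivalency_states : List (String × Int)) (out : Int) : Prop := out = get_max_continuous_mer_size_alt pair_multivalency_states
instance (pair_multivalency_states : List (String × Int)) (out : Int) : Decidable (Spec_get_max_continuous_mer_size pair_multivalency_states out) := by unfold Spec_get_max_continuous_mer_size; infer_instance

-- ===== CLAIM (what is proved, stated in full; the proofs are below) =====
def Claim_equal_get_max_continuous_mer_size : Prop := ∀ (pair_multivalency_states : List (String × Int)), Dom_get_max_continuous_mer_size pair_multivalency_states → Pre_get_max_continuous_mer_size pair_multivalency_states → Spec_get_max_continuous_mer_size pair_multivalency_states (get_max_continuous_mer_size pair_multivalency_states)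

-- ===== LEMMAS AND PROOFS =====

-- Core: walking a strictly increasing list that holds exactly the elements of s greater than a
-- computes the same value as probing a+1, a+2, … for membership in s.
theorem pvALoop_eq_pvBProbe (rest : List Int) :
    ∀ (s : List Int) (a : Int) (fuel : Nat),
      rest.Pairwise (· < ·) →
      (∀ x : Int, x ∈ rest ↔ (x ∈ s ∧ a < x)) →
      rest.length ≤ fuel →
      pvALoop rest (a + 1) a = pvBProbe fuel a s := by
  induction rest with
  | nil =>
    intro s a fuel _ hmem _
    have hnot : (a + 1) ∉ s := by
      intro h
      have : (a + 1) ∈ ([] : List Int) := (hmem (a + 1)).2 ⟨h, by omega⟩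
      simp at this
    cases fuel with
    | zero => rfl
    | succ f => simp [pvALoop, pvBProbe, hnot]
  | cons b rs ih =>
    intro s a fuel hpw hmem hlen
    have hb : b ∈ s ∧ a < b := (hmem b).1 (by simp)
    have hbrs : ∀ x ∈ rs, b < x := by
      intro x hx; exact (List.pairwise_cons.1 hpw).1 x hx
    cases fuel with
    | zero => simp at hlen
    | succ f =>
      by_cases hin : (a + 1) ∈ s
      · -- a+1 ∈ s and a < a+1, so a+1 ∈ b :: rs; minimality forces b = a+1
        have hmem1 : (a + 1) ∈ b :: rs := (hmem (a + 1)).2 ⟨hin, by omega⟩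
        have hba : b = a + 1 := by
          rcases List.mem_cons.1 hmem1 with h | h
          · omega
          · have := hbrs _ h; omega
        subst hba
        have step : pvALoop ((a + 1) :: rs) (a + 1) a = pvALoop rs (a + 1 + 1) (a + 1) := by
          simp [pvALoop]
        rw [step]
        have hrs : ∀ x : Int, x ∈ rs ↔ (x ∈ s ∧ (a + 1) < x) := by
          intro x
          constructor
          · intro hx
            have hx' := (hmem x).1 (List.mem_cons_of_mem _ hx)
            exact ⟨hx'.1, hbrs x hx⟩
          · intro ⟨hxs, hxlt⟩
            have := (hmem x).2 ⟨hxs, by omega⟩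
            rcases List.mem_cons.1 this with h | h
            · omega
            · exact h
        rw [show pvBProbe (f + 1) a s = pvBProbe f (a + 1) s by simp [pvBProbe, hin]]
        exact ih s (a + 1) f (List.pairwise_cons.1 hpw).2 hrs (by simp at hlen; omega)
      · -- a+1 ∉ s: b ≠ a+1 (b ∈ s), both sides return a
        have hbne : ¬ ((a + 1 : Int) == b) = true := by
          simp only [beq_iff_eq]
          intro h; rw [← h] at hb; exact hin hb.1
        simp [pvALoop, pvBProbe, hbne, hin]

theorem get_max_continuous_mer_size_spec : Claim_equal_get_max_continuous_mer_size := by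
  intro l _ hpre
  unfold Spec_get_max_continuous_mer_size
  simp only [get_max_continuous_mer_size, get_max_continuous_mer_size_alt]
  set lens : List Int := l.map (fun config => PySem.Str.len config.1) with hlens
  set s : PySem.Set Int := PySem.Set.ofList lens with hs
  set srt : List Int := PySem.List.sorted s (fun x => x) false with hsrt
  have hperm : srt.Perm s := PySem.List.sorted_perm s (fun x => x) false
  have hpw : srt.Pairwise (· < ·) := PySem.List.sorted_ofList_pairwise_lt lens
  have hmemeq : ∀ x : Int, x ∈ srt ↔ x ∈ s := fun x => hperm.mem_iff
  have hlne : lens ≠ [] := by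
    cases l with
    | nil => exact absurd rfl hpre
    | cons h t => simp [hlens]
  have hsne : s ≠ [] := by
    intro h
    obtain ⟨a, ha⟩ := List.exists_mem_of_ne_nil lens hlne
    have : a ∈ s := (PySem.Set.mem_ofList lens a).mpr ha
    rw [h] at this; simp at this
  have hsrtne : srt ≠ [] := by
    intro h
    rw [h] at hperm
    exact hsne (hperm.symm.eq_nil)
  obtain ⟨m1, hm1⟩ : ∃ m, PySem.List.min? srt (fun x => x) = some m := by
    cases h : PySem.List.min? srt (fun x => x) with
    | none => exact absurd ((PySem.List.min?_eq_none_iff srt (fun x => x)).mp h) hsrtne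
    | some m => exact ⟨m, rfl⟩
  obtain ⟨m2, hm2⟩ : ∃ m, PySem.List.min? s (fun x => x) = some m := by
    cases h : PySem.List.min? s (fun x => x) with
    | none => exact absurd ((PySem.List.min?_eq_none_iff s (fun x => x)).mp h) hsne
    | some m => exact ⟨m, rfl⟩
  have hm1mem : m1 ∈ srt := PySem.List.min?_mem hm1
  have hm2mem : m2 ∈ s := PySem.List.min?_mem hm2
  have hm1min : ∀ y ∈ srt, m1 ≤ y := PySem.List.min?_isMin hm1
  have hm2min : ∀ y ∈ s, m2 ≤ y := PySem.List.min?_isMin hm2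
  have heqm : m1 = m2 :=
    le_antisymm (hm1min m2 ((hmemeq m2).2 hm2mem)) (hm2min m1 ((hmemeq m1).1 hm1mem))
  rw [hm1, hm2, ← heqm]
  -- srt = m1 :: tail  (the head of a strictly increasing list is its minimum)
  obtain ⟨h0, tail, hcons⟩ : ∃ h0 tail, srt = h0 :: tail := by
    cases hc : srt with
    | nil => exact absurd hc hsrtne
    | cons h t => exact ⟨h, t, rfl⟩
  have hh0 : h0 = m1 := by
    have hh0mem : h0 ∈ srt := by rw [hcons]; simp
    have h1 : m1 ≤ h0 := hm1min h0 hh0mem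
    have h2 : h0 ≤ m1 := by
      rw [hcons] at hm1mem
      rcases List.mem_cons.1 hm1mem with h | h
      · omega
      · have hlt := (List.pairwise_cons.1 (hcons ▸ hpw)).1 m1 h
        omega
    omega
  rw [hcons, hh0]
  show pvALoop (m1 :: tail) m1 m1 = pvBProbe s.length m1 s
  -- one step of A's loop: the first index equals the first element
  rw [show pvALoop (m1 :: tail) m1 m1 = pvALoop tail (m1 + 1) m1 by simp [pvALoop]]
  -- the core lemma finishes
  have hpwt : tail.Pairwise (· < ·) := (List.pairwise_cons.1 (hcons ▸ hpw)).2
  have htmem : ∀ x : Int, x ∈ tail ↔ (x ∈ s ∧ m1 < x) := by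
    intro x
    constructor
    · intro hx
      have hxs : x ∈ srt := by rw [hcons]; exact List.mem_cons_of_mem _ hx
      refine ⟨(hmemeq x).1 hxs, ?_⟩
      have := (List.pairwise_cons.1 (hcons ▸ hpw)).1 x hx
      omega
    · intro ⟨hxs, hxlt⟩
      have hxm : x ∈ srt := (hmemeq x).2 hxs
      rw [hcons] at hxm
      rcases List.mem_cons.1 hxm with h | h
      · omega
      · exact h
  have hlen : tail.length ≤ s.length := by
    have := hperm.length_eq
    rw [hcons] at this
    simp at this
    omega
  exact pvALoop_eq_pvBProbe tail s m1 s.length hpwt htmem hlen
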